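-- pv_equiv track=rewrite | github.com/MinWoongL/Algorithm_Study | SWEA/Algorithm/230331/triad_bank-business.py | t_to_d
-- ===== SOURCE A (Python) =====
-- def t_to_d(n):
--     num = 0
--     check = 0
--     for i in range(len(n)-1, -1, -1):
--         if n[i] != '0':
--             num += int(n[i])*(3**check)
--         check += 1
--
--     return num
-- ===== SOURCE B (Python) =====
-- def t_to_d(n):
--     num = 0
--     for d in n:
--         num = num * 3 + int(d)
--     return num
-- ===== Notes on version B (the rewrite author's own statement) =====
-- stated objective: idiomatic
-- what changed: Replaces the right-to-left loop that recomputes 3**check at every position with a left-to-right Horner accumulation num = num*3 + int(d).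
import Mathlib
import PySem

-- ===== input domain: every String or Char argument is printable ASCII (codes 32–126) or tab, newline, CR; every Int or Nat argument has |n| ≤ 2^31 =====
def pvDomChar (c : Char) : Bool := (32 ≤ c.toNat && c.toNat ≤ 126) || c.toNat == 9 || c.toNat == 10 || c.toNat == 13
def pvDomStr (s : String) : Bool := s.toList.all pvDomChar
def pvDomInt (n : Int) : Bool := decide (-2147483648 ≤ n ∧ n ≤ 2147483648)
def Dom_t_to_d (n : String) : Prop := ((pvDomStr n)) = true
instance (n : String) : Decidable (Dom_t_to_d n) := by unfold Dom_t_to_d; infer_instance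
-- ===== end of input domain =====

-- B replaces A's right-to-left loop with precomputed powers of 3 by a left-to-right Horner accumulation (idiomatic; same results).


-- int(str(c)) for a single char, as A and B both use it; 0 is never reached under Pre_
def pvDigit (c : Char) : Int := (PySem.Int.ofChars? [c]).getD 0

-- ===== PORT A =====
-- num = 0; check = 0; for i in range(len(n)-1, -1, -1): if n[i] != '0': num += int(n[i])*3**check; check += 1
def t_to_d (n : String) : Int :=
  (((PySem.List.pyRange ((n.toList.length : Int) - 1) (-1) (-1)).foldl
      (fun (p : Int × Nat) i =>
        match PySem.List.pyGet? n.toList i with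
        | some c => (if c ≠ '0' then p.1 + pvDigit c * 3 ^ p.2 else p.1, p.2 + 1)
        | none => p)
      (0, 0))).1

-- ===== PORT B =====
-- num = 0; for d in n: num = num*3 + int(d)
def t_to_d_alt (n : String) : Int :=
  n.toList.foldl (fun num c => num * 3 + pvDigit c) 0

-- ===== PRECONDITION & SPEC =====
-- Pre_ excludes exactly the strings containing a non-digit character, on which both Pythons raise ValueError from int().
def Pre_t_to_d (n : String) : Prop := n.toList.all PySem.Chars.isdigit = true
instance (n : String) : Decidable (Pre_t_to_d n) := by unfold Pre_t_to_d; infer_instance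
def pvWitness_t_to_d : String := "102"
def Spec_t_to_d (n : String) (out : Int) : Prop := out = t_to_d_alt n
instance (n : String) (out : Int) : Decidable (Spec_t_to_d n out) := by unfold Spec_t_to_d; infer_instance

-- ===== CLAIM (what is proved, stated in full; the proofs are below) =====
def Claim_equal_t_to_d : Prop := ∀ (n : String), Dom_t_to_d n → Pre_t_to_d n → Spec_t_to_d n (t_to_d n)

-- ===== LEMMAS AND PROOFS =====

theorem pvDigit_zero : pvDigit '0' = 0 := by decide

-- A's descending index list, in map-over-range form
theorem pvIdx_eq (m : Nat) :
    PySem.List.pyRange ((m : Int) - 1) (-1) (-1)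
      = (List.range m).map (fun k : Nat => (m : Int) - 1 - (k : Int)) := by
  simp only [PySem.List.pyRange]
  rcases Nat.eq_zero_or_pos m with h | h
  · subst h; norm_num
  · have h1 : ¬ ((0:Int) < -1) := by norm_num
    have h2 : (-1:Int) < (m : Int) - 1 := by omega
    simp only [if_neg (by norm_num : ¬ ((-1:Int) = 0)), h1, if_false, if_pos h2]
    have hc : ((((m:Int) - 1 - -1 + - -1 - 1) / - -1)).toNat = m := by norm_num
    rw [hc]
    apply List.map_congr_left
    intro k _
    ring

-- one step of the descending index list: range (m+1) reversed starts at m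
theorem pvIdx_cons (m : Nat) :
    (List.range (m + 1)).map (fun k : Nat => ((m + 1 : Nat) : Int) - 1 - (k : Int))
      = (m : Int) :: (List.range m).map (fun k : Nat => (m : Int) - 1 - (k : Int)) := by
  rw [List.range_succ_eq_map, List.map_cons, List.map_map]
  refine congrArg₂ List.cons ?_ ?_
  · push_cast; ring
  · apply List.map_congr_left
    intro k _
    simp only [Function.comp_apply]
    push_cast; ring

-- the A-loop over t's indices, indexing into t, started at (num, e)
theorem pvLoopA (t : List Char) (num : Int) (e : Nat) :
    (((List.range t.length).map (fun k : Nat => (t.length : Int) - 1 - (k : Int))).foldl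
      (fun (p : Int × Nat) i =>
        match PySem.List.pyGet? t i with
        | some c => (if c ≠ '0' then p.1 + pvDigit c * 3 ^ p.2 else p.1, p.2 + 1)
        | none => p)
      (num, e)).1
      = num + 3 ^ e * t.foldl (fun a c => a * 3 + pvDigit c) 0 := by
  induction t using List.reverseRecOn generalizing num e with
  | nil => simp
  | append_singleton t c ih =>
    have hlen : (t ++ [c]).length = t.length + 1 := by simp
    rw [hlen, pvIdx_cons, List.foldl_cons]
    have hget : PySem.List.pyGet? (t ++ [c]) ((t.length : Nat) : Int) = some c := by
      rw [PySem.List.pyGet?_natCast]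
      simp
    simp only [hget]
    have hstep : (if c ≠ '0' then num + pvDigit c * 3 ^ e else num) = num + pvDigit c * 3 ^ e := by
      split_ifs with h
      · rfl
      · have hc : c = '0' := by simpa using h
        rw [hc, pvDigit_zero]; ring
    rw [hstep]
    -- remaining indices are t's; pyGet? agrees on them since they are < t.length
    have hcongr :
        (((List.range t.length).map (fun k : Nat => (t.length : Int) - 1 - (k : Int))).foldl
          (fun (p : Int × Nat) i =>
            match PySem.List.pyGet? (t ++ [c]) i with
            | some x => (if x ≠ '0' then p.1 + pvDigit x * 3 ^ p.2 else p.1, p.2 + 1)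
            | none => p)
          (num + pvDigit c * 3 ^ e, e + 1))
        = (((List.range t.length).map (fun k : Nat => (t.length : Int) - 1 - (k : Int))).foldl
          (fun (p : Int × Nat) i =>
            match PySem.List.pyGet? t i with
            | some x => (if x ≠ '0' then p.1 + pvDigit x * 3 ^ p.2 else p.1, p.2 + 1)
            | none => p)
          (num + pvDigit c * 3 ^ e, e + 1)) := by
      apply PySem.List.foldl_congr_mem
      intro p i hi
      obtain ⟨k, hk, rfl⟩ := List.mem_map.mp hi
      have hk' : k < t.length := List.mem_range.mp hk
      have hidx : ((t.length : Int) - 1 - (k : Int)) = ((t.length - 1 - k : Nat) : Int) := by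
        omega
      have hlt : t.length - 1 - k < t.length := by omega
      rw [hidx, PySem.List.pyGet?_natCast, PySem.List.pyGet?_natCast,
        List.getElem?_append_left hlt]
    rw [hcongr, ih]
    rw [List.foldl_append]
    simp only [List.foldl_cons, List.foldl_nil]
    ring

-- ===== VERDICT (by name: the statement is the Claim_ definition above) =====
theorem t_to_d_spec : Claim_equal_t_to_d := by
  intro n _ _
  unfold Spec_t_to_d t_to_d t_to_d_alt
  rw [pvIdx_eq, pvLoopA]
  simp
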